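-- pv_equiv track=rewrite | github.com/Skelothan/legimus | rooms_v05.py | makeMazeRoom
-- ===== SOURCE A (Python) =====
-- def makeMazeBlock(cell):
--     hallways = {
--     1: (0,1), # up
--     2: (2,1), # down
--     4: (1,0), # left
--     8: (1,2)  # right
--     }
--     block = [[-1 for i in range(3)] for i in range(3)]
--     block[1][1] = 16
--     for key, value in hallways.items():
--         if cell & key == key:
--             block[value[0]][value[1]] = 16
--     return block
--
-- def makeMazeRoom(mazeData):
--     tempRow = [[],[],[]]
--     room = []
--     for dataRow in mazeData:
--         for dataCell in dataRow:
--             block = makeMazeBlock(dataCell)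
--             for i in range(3):
--                 tempRow[i] += block[i]
--         room += tempRow
--         tempRow = [[],[],[]]
--     return room
-- ===== SOURCE B (Python) =====
-- def makeMazeRoom(mazeData):
--     room = []
--     for row in mazeData:
--         room.append([v for c in row for v in (-1, 16 if c & 1 == 1 else -1, -1)])
--         room.append([v for c in row for v in (16 if c & 4 == 4 else -1, 16, 16 if c & 8 == 8 else -1)])
--         room.append([v for c in row for v in (-1, 16 if c & 2 == 2 else -1, -1)])
--     return room
-- ===== Notes on version B (the rewrite author's own statement) =====
-- stated objective: simpler
-- what changed: B drops the makeMazeBlock helper, hallways dict and the tempRow/range(3) concatenation machinery: per input row it directly emits three output rows, computing each 3x3 position's value inline from the direction bits.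
import Mathlib
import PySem

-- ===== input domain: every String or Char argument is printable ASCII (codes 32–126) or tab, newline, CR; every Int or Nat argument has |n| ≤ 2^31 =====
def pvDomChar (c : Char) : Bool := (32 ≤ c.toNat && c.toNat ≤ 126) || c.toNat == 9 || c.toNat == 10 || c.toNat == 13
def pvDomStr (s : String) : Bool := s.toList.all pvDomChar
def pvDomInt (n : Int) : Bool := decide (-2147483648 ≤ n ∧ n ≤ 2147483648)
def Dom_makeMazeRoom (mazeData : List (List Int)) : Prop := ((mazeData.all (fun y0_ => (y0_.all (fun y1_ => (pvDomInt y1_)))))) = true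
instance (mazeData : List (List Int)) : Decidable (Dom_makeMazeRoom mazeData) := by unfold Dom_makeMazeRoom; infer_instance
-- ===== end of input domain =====

-- B replaces A's per-cell 3x3 block building and row-strip concatenation by directly
-- emitting three output rows per input row with each position's value computed inline (simpler).

-- ===== PORT A =====
-- Python: block[r][c] = v on a list-of-lists
def setCell2 (block : List (List Int)) (r c : Nat) (v : Int) : List (List Int) :=
  block.set r ((block.getD r []).set c v)

def makeMazeBlock (cell : Int) : List (List Int) :=
  let hallways : List (Int × (Nat × Nat)) := [(1, (0, 1)), (2, (2, 1)), (4, (1, 0)), (8, (1, 2))]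
  let block : List (List Int) := (List.range 3).map (fun _ => (List.range 3).map (fun _ => (-1 : Int)))
  let block := setCell2 block 1 1 16
  hallways.foldl
    (fun b kv => if Int.land cell kv.1 == kv.1 then setCell2 b kv.2.1 kv.2.2 16 else b)
    block

-- the body of A's inner 'for dataCell in dataRow' loop (named so the induction can speak about it)
def stripStep (tempRow : List (List Int)) (dataCell : Int) : List (List Int) :=
  let block := makeMazeBlock dataCell
  (List.range 3).foldl
    (fun t i => t.set i ((t.getD i []) ++ (block.getD i []))) tempRow

def makeMazeRoom (mazeData : List (List Int)) : List (List Int) :=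
  mazeData.foldl
    (fun room dataRow =>
      let tempRow : List (List Int) :=
        dataRow.foldl stripStep [[], [], []]
      room ++ tempRow)
    []

-- ===== PORT B =====
def makeMazeRoom_alt (mazeData : List (List Int)) : List (List Int) :=
  mazeData.flatMap (fun row =>
    [ row.flatMap (fun c => [-1, if Int.land c 1 == 1 then 16 else -1, -1])
    , row.flatMap (fun c => [if Int.land c 4 == 4 then 16 else -1, 16, if Int.land c 8 == 8 then 16 else -1])
    , row.flatMap (fun c => [-1, if Int.land c 2 == 2 then 16 else -1, -1]) ])

-- ===== PRECONDITION & SPEC =====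
def Spec_makeMazeRoom (mazeData : List (List Int)) (out : List (List Int)) : Prop := out = makeMazeRoom_alt mazeData
instance (mazeData : List (List Int)) (out : List (List Int)) : Decidable (Spec_makeMazeRoom mazeData out) := by unfold Spec_makeMazeRoom; infer_instance

-- ===== CLAIM (what is proved, stated in full; the proofs are below) =====
def Claim_equal_makeMazeRoom : Prop := ∀ (mazeData : List (List Int)), Dom_makeMazeRoom mazeData → Spec_makeMazeRoom mazeData (makeMazeRoom mazeData)

-- ===== LEMMAS AND PROOFS =====

theorem makeMazeBlock_eq (cell : Int) :
    makeMazeBlock cell =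
      [ [-1, if Int.land cell 1 == 1 then 16 else -1, -1]
      , [if Int.land cell 4 == 4 then 16 else -1, 16, if Int.land cell 8 == 8 then 16 else -1]
      , [-1, if Int.land cell 2 == 2 then 16 else -1, -1] ] := by
  simp only [makeMazeBlock, setCell2, List.foldl_cons, List.foldl_nil]
  split_ifs <;> rfl

theorem stripStep_eq (a b c : List Int) (cell : Int) :
    stripStep [a, b, c] cell =
      [ a ++ [-1, if Int.land cell 1 == 1 then 16 else -1, -1]
      , b ++ [if Int.land cell 4 == 4 then 16 else -1, 16, if Int.land cell 8 == 8 then 16 else -1]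
      , c ++ [-1, if Int.land cell 2 == 2 then 16 else -1, -1] ] := by
  simp [stripStep, makeMazeBlock_eq, List.range_succ, List.getD]

theorem rowStrip_eq (dataRow : List Int) (a b c : List Int) :
    dataRow.foldl stripStep [a, b, c] =
      [ a ++ dataRow.flatMap (fun x => [-1, if Int.land x 1 == 1 then 16 else -1, -1])
      , b ++ dataRow.flatMap (fun x => [if Int.land x 4 == 4 then 16 else -1, 16, if Int.land x 8 == 8 then 16 else -1])
      , c ++ dataRow.flatMap (fun x => [-1, if Int.land x 2 == 2 then 16 else -1, -1]) ] := by
  induction dataRow generalizing a b c with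
  | nil => simp
  | cons h t ih =>
    simp only [List.foldl_cons, List.flatMap_cons, stripStep_eq]
    rw [ih]
    simp

theorem makeMazeRoom_acc (mazeData : List (List Int)) (acc : List (List Int)) :
    mazeData.foldl
        (fun room dataRow =>
          let tempRow : List (List Int) := dataRow.foldl stripStep [[], [], []]
          room ++ tempRow)
        acc =
      acc ++ makeMazeRoom_alt mazeData := by
  induction mazeData generalizing acc with
  | nil => simp [makeMazeRoom_alt]
  | cons r t ih =>
    simp only [List.foldl_cons]
    rw [ih]
    simp [makeMazeRoom_alt, rowStrip_eq]

-- ===== VERDICT (by name: the statement is the Claim_ definition above) =====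
theorem makeMazeRoom_spec : Claim_equal_makeMazeRoom := by
  intro mazeData _
  unfold Spec_makeMazeRoom makeMazeRoom
  rw [makeMazeRoom_acc]
  simp
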